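-- pv_equiv track=rewrite | github.com/combra-lab/pop-spiking-deep-rl | loihi_realization/utility.py | decoder_multiple_from_one_int
-- ===== SOURCE A (Python) =====
-- def decoder_multiple_from_one_int(encode_list, num_bits=7, overall_bits=28):
--     """
--     Decode one integer into multiple integers
--     :param encode_list: list of encoded integers
--     :param num_bits: max number of bits for item in input list
--     :param overall_bits: overall bits of one integer
--     :return: input_list
--     """
--     input_list = []
--     int_per_int_num = overall_bits // num_bits
--     for big_int in encode_list:
--         tmp_big_int = big_int
--         for i in range(int_per_int_num):
--             small_int = tmp_big_int - (tmp_big_int >> num_bits << num_bits)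
--             tmp_big_int = tmp_big_int >> num_bits
--             input_list.append(small_int)
--     return input_list
-- ===== SOURCE B (Python) =====
-- def decoder_multiple_from_one_int(encode_list, num_bits=7, overall_bits=28):
--     int_per_int_num = overall_bits // num_bits
--     # staged pass: column i holds chunk i of EVERY encoded integer
--     columns = [[(b >> (i * num_bits)) % (1 << num_bits) for b in encode_list]
--                for i in range(int_per_int_num)]
--     # transpose back to per-integer order and flatten
--     input_list = []
--     for row in zip(*columns):
--         input_list.extend(row)
--     return input_list
-- ===== Notes on version B (the rewrite author's own statement) =====
-- stated objective: alternative
-- what changed: Replaces A's single row-major pass with a threaded shift-accumulator (tmp_big_int repeatedly shifted, chunk via the subtract-shifted-back trick) by a staged column-major computation: for each chunk index i one pass extracts chunk i of every integer directly as (b >> (i*num_bits)) % (1 << num_bits), and a final zip(*columns) transpose restores per-integer order; no mutable accumulator state remains.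
import Mathlib
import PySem

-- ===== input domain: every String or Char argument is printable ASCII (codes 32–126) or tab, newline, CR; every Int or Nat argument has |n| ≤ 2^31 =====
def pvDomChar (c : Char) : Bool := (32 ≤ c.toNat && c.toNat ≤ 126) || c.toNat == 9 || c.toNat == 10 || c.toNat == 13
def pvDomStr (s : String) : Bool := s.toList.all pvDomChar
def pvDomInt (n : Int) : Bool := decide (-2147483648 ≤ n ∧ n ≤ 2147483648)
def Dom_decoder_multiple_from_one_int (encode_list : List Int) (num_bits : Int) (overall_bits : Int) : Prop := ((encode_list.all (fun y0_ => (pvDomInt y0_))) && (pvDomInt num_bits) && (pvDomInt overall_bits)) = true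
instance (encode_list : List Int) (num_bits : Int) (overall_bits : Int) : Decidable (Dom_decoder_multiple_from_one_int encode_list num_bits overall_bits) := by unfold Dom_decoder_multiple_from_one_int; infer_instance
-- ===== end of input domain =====

-- B replaces A's row-major accumulator pass with a staged column-major extraction (one pass per chunk index) followed by a zip-transpose; objective: alternative (same cost, no threaded mutable state).


-- ===== PORT A =====
def decoder_multiple_from_one_int (encode_list : List Int) (num_bits : Int) (overall_bits : Int) : List Int :=
  let int_per_int_num := PySem.Int.floordiv overall_bits num_bits
  (encode_list.foldl (fun (input_list : List Int) big_int =>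
    ((PySem.List.pyRange 0 int_per_int_num 1).foldl
      (fun (st : List Int × Int) _i =>
        let small_int := st.2 - (st.2 >>> num_bits.toNat <<< num_bits.toNat)
        (st.1 ++ [small_int], st.2 >>> num_bits.toNat))
      (input_list, big_int)).1) [])

-- ===== PORT B =====
-- hand port of Python's zip(*rows) for rows : List (List Int): exact — yields the heads
-- of all rows while every row is nonempty, recursing on the tails (zip of no iterables is empty)
def pvZipStar (rows : List (List Int)) : List (List Int) :=
  match rows with
  | [] => []
  | r :: rs =>
    if (r :: rs).any (fun x => x.isEmpty) then []
    else (r.headD 0 :: rs.map (fun x => x.headD 0)) :: pvZipStar (r.tail :: rs.map (fun x => x.tail))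
termination_by (rows.headD []).length
decreasing_by
  simp only [List.headD_cons]
  cases r with
  | nil => simp at *
  | cons a t => simp

def decoder_multiple_from_one_int_alt (encode_list : List Int) (num_bits : Int) (overall_bits : Int) : List Int :=
  let int_per_int_num := PySem.Int.floordiv overall_bits num_bits
  let columns := (PySem.List.pyRange 0 int_per_int_num 1).map (fun i =>
    encode_list.map (fun (b : Int) =>
      PySem.Int.mod (b >>> (i * num_bits).toNat) ((1:Int) <<< num_bits.toNat)))
  (pvZipStar columns).foldl (fun (input_list : List Int) row => input_list ++ row) []

-- ===== PRECONDITION & SPEC =====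
-- Pre_ excludes exactly the inputs where Python A raises: num_bits = 0 (ZeroDivisionError),
-- and num_bits < 0 with a nonempty list and a positive loop count (ValueError: negative shift).
def Pre_decoder_multiple_from_one_int (encode_list : List Int) (num_bits : Int) (overall_bits : Int) : Prop :=
  num_bits ≠ 0 ∧ (0 < num_bits ∨ encode_list = [] ∨ PySem.Int.floordiv overall_bits num_bits ≤ 0)
instance (encode_list : List Int) (num_bits : Int) (overall_bits : Int) : Decidable (Pre_decoder_multiple_from_one_int encode_list num_bits overall_bits) := by unfold Pre_decoder_multiple_from_one_int; infer_instance

def pvWitness_decoder_multiple_from_one_int : List Int × Int × Int := ([300, -5], 7, 28)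

def Spec_decoder_multiple_from_one_int (encode_list : List Int) (num_bits : Int) (overall_bits : Int) (out : List Int) : Prop := out = decoder_multiple_from_one_int_alt encode_list num_bits overall_bits
instance (encode_list : List Int) (num_bits : Int) (overall_bits : Int) (out : List Int) : Decidable (Spec_decoder_multiple_from_one_int encode_list num_bits overall_bits out) := by unfold Spec_decoder_multiple_from_one_int; infer_instance

-- ===== CLAIM (what is proved, stated in full; the proofs are below) =====
def Claim_equal_decoder_multiple_from_one_int : Prop := ∀ (encode_list : List Int) (num_bits : Int) (overall_bits : Int), Dom_decoder_multiple_from_one_int encode_list num_bits overall_bits → Pre_decoder_multiple_from_one_int encode_list num_bits overall_bits → Spec_decoder_multiple_from_one_int encode_list num_bits overall_bits (decoder_multiple_from_one_int encode_list num_bits overall_bits)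

-- ===== LEMMAS AND PROOFS =====

-- the subtraction trick equals Python's nonnegative remainder by 2^n
theorem pv_elem (n : Nat) (t : Int) :
    t - (t >>> n <<< n) = PySem.Int.mod t ((1:Int) <<< n) := by
  have h2 : (0:Int) < 2 ^ n := by positivity
  have h1 : (1:Int) <<< n = 2 ^ n := by simp [Int.shiftLeft_eq]
  rw [h1, PySem.Int.mod_eq_emod_of_pos h2, Int.shiftRight_eq_div_pow,
    Int.shiftLeft_eq, Int.emod_def]
  push_cast
  ring

theorem pv_shift_add (t : Int) (a b : Nat) : t >>> a >>> b = t >>> (a + b) := by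
  simp only [Int.shiftRight_eq_div_pow, pow_add]
  push_cast
  rw [Int.ediv_ediv_of_nonneg (by positivity)]

-- A's inner accumulator fold over range(j, j+k) produces the chunks in direct indexed form
theorem pv_inner (n : Nat) (big : Int) (k : Nat) :
    ∀ (j : Nat) (acc : List Int),
      ((PySem.List.pyRange (j:Int) ((j:Int) + (k:Int)) 1).foldl
        (fun (st : List Int × Int) _i =>
          (st.1 ++ [st.2 - (st.2 >>> n <<< n)], st.2 >>> n))
        (acc, big >>> (j * n))).1
      = acc ++ (PySem.List.pyRange (j:Int) ((j:Int) + (k:Int)) 1).map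
          (fun (i : Int) => PySem.Int.mod (big >>> (i * (n:Int)).toNat) ((1:Int) <<< n)) := by
  induction k with
  | zero => intro j acc; simp [PySem.List.pyRange_one_eq_nil]
  | succ m ih =>
    intro j acc
    rw [PySem.List.pyRange_one_cons (by push_cast; omega)]
    simp only [List.foldl_cons, List.map_cons]
    have hsh : big >>> (j * n) >>> n = big >>> ((j + 1) * n) := by
      rw [pv_shift_add]; ring_nf
    have harg : (((j:Int)) * (n:Int)).toNat = j * n := by
      exact_mod_cast Int.toNat_natCast (j*n)
    rw [hsh]
    have IH := ih (j+1) (acc ++ [big >>> (j * n) - big >>> ((j+1) * n) <<< n])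
    push_cast at IH ⊢
    rw [show (j:Int) + ((m:Int) + 1) = (j:Int) + 1 + (m:Int) by ring]
    rw [IH]
    have he : big >>> (j*n) - big >>> ((j+1)*n) <<< n
        = PySem.Int.mod (big >>> ((j:Int) * (n:Int)).toNat) ((1:Int) <<< n) := by
      rw [← hsh, pv_elem, harg]
    rw [he]
    simp

-- A's outer fold over the list in row-major chunk order
theorem pv_outer (n : Nat) (K : Int) (hK : 0 ≤ K) (l : List Int) :
    ∀ (acc : List Int),
      (l.foldl (fun (input_list : List Int) big_int =>
        ((PySem.List.pyRange 0 K 1).foldl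
          (fun (st : List Int × Int) _i =>
            (st.1 ++ [st.2 - (st.2 >>> n <<< n)], st.2 >>> n))
          (input_list, big_int)).1) acc)
      = acc ++ l.flatMap (fun (big_int : Int) =>
          (PySem.List.pyRange 0 K 1).map
            (fun (i : Int) => PySem.Int.mod (big_int >>> (i * (n:Int)).toNat) ((1:Int) <<< n))) := by
  induction l with
  | nil => intro acc; simp
  | cons b t ih =>
    intro acc
    have hKk : ((K.toNat : Nat) : Int) = K := Int.toNat_of_nonneg hK
    simp only [List.foldl_cons, List.flatMap_cons]
    have hin := pv_inner n b K.toNat 0 acc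
    simp only [Nat.cast_zero, zero_add, Nat.zero_mul, Int.shiftRight_zero] at hin
    rw [hKk] at hin
    rw [hin, ih]
    simp [List.append_assoc]

-- transposing the column-major table recovers the row-major table
theorem pv_zip (f : Int → Int → Int) (c : Int) (cs : List Int) :
    ∀ (l : List Int),
      pvZipStar ((c :: cs).map (fun i => l.map (f i)))
        = l.map (fun b => (c :: cs).map (fun i => f i b)) := by
  intro l
  induction l generalizing c cs with
  | nil =>
    rw [pvZipStar.eq_def]
    simp
  | cons b t ih =>
    rw [pvZipStar.eq_def]
    simp only [List.map_cons, List.map_map, Function.comp_def, List.any_cons,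
      List.isEmpty_cons, List.headD_cons, List.tail_cons, List.any_map]
    rw [if_neg (by simp)]
    have := ih c cs
    simp only [List.map_cons] at this
    simp [this]

-- flattening by left-fold append
theorem pv_flatten (rows : List (List Int)) :
    ∀ (acc : List Int), rows.foldl (fun (o : List Int) r => o ++ r) acc = acc ++ rows.flatten := by
  induction rows with
  | nil => intro acc; simp
  | cons r rs ih => intro acc; simp [ih, List.append_assoc]

-- ===== VERDICT (by name: the statement is the Claim_ definition above) =====
theorem decoder_multiple_from_one_int_spec : Claim_equal_decoder_multiple_from_one_int := by
  intro encode_list num_bits overall_bits _hdom hpre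
  unfold Spec_decoder_multiple_from_one_int
  unfold decoder_multiple_from_one_int decoder_multiple_from_one_int_alt
  dsimp only
  obtain ⟨hne, hcase⟩ := hpre
  set K := PySem.Int.floordiv overall_bits num_bits with hKdef
  by_cases hKpos : 0 < K
  · rcases hcase with hpos | hnil | hKle
    · -- nonempty loop count, positive num_bits: full equivalence
      obtain ⟨c, cs, hr⟩ : ∃ c cs, PySem.List.pyRange 0 K 1 = c :: cs := by
        rw [PySem.List.pyRange_one_cons (by omega)]; exact ⟨_, _, rfl⟩
      rw [pv_outer num_bits.toNat K (le_of_lt hKpos) encode_list [], hr,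
        pv_zip (fun i b => PySem.Int.mod (b >>> (i * num_bits).toNat) ((1:Int) <<< num_bits.toNat)) c cs,
        pv_flatten]
      simp [Int.toNat_of_nonneg (le_of_lt hpos), List.flatMap]
    · -- empty list: A appends nothing; B's columns are all empty, so the transpose is empty
      subst hnil
      cases hrg : PySem.List.pyRange 0 K 1 with
      | nil => simp [pvZipStar]
      | cons a as =>
        simp only [List.foldl_nil, List.map_cons, List.map_nil]
        rw [pvZipStar.eq_def]
        simp
    · omega
  · -- empty range: both sides collapse to []
    have hnil : PySem.List.pyRange 0 K 1 = [] :=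
      PySem.List.pyRange_one_eq_nil (by omega)
    rw [hnil]
    simp [pvZipStar]
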